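-- pv_equiv track=rewrite | github.com/inpentest/qdos | qdos.py | build_deep_introspection_fragment
-- ===== SOURCE A (Python) =====
-- def build_deep_introspection_fragment(depth):
--     fragment = "name"
--     for _ in range(depth):
--         fragment = f"""
--         name
--         fields {{
--           name
--           type {{
--             name
--             fields {{
--               {fragment}
--             }}
--           }}
--         }}
--         """
--     return f"""
--       __schema {{
--         types {{
--           {fragment}
--         }}
--       }}
--     """
-- ===== SOURCE B (Python) =====
-- # B: build the core by string multiplication of the fixed wrap blocks (O(depth))
-- # instead of A's repeated re-wrapping (O(depth^2) character copying).
--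
-- _PRE = ("\n        name\n        fields {\n          name\n          type {"
--         "\n            name\n            fields {\n              ")
-- _SUF = "\n            }\n          }\n        }\n        "
-- _OPRE = "\n      __schema {\n        types {\n          "
-- _OSUF = "\n        }\n      }\n    "
--
--
-- def build_deep_introspection_fragment(depth):
--     return _OPRE + _PRE * depth + "name" + _SUF * depth + _OSUF
-- ===== Notes on version B (the rewrite author's own statement) =====
-- stated objective: faster
-- what changed: B concatenates the fixed prefix block repeated depth times, the core 'name', and the fixed suffix block repeated depth times in one expression, instead of A's loop that rewraps the whole growing fragment on every iteration.
import Mathlib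
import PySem

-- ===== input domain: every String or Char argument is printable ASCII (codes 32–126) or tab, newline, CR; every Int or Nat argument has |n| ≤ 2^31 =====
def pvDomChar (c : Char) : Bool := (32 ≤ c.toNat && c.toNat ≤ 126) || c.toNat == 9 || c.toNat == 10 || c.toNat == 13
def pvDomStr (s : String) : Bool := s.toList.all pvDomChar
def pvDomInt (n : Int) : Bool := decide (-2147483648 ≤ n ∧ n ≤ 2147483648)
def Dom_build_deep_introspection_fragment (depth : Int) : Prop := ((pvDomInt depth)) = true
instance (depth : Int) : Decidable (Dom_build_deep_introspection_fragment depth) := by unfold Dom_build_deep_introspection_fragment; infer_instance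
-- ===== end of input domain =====

-- B builds the result by repeating the fixed wrap blocks depth times around the core once (O(depth)),
-- instead of A's loop that rewraps the whole growing fragment each iteration (O(depth^2)).

-- ===== PORT A =====
-- A's f-string wrap, split at the interpolation point {fragment}
def pvA_pre : String := "\n        name\n        fields {\n          name\n          type {\n            name\n            fields {\n              "
def pvA_suf : String := "\n            }\n          }\n        }\n        "
def pvA_opre : String := "\n      __schema {\n        types {\n          "
def pvA_osuf : String := "\n        }\n      }\n    "

def build_deep_introspection_fragment (depth : Int) : String :=
  let fragment :=
    (PySem.List.pyRange 0 depth 1).foldl (fun frag _ => pvA_pre ++ frag ++ pvA_suf) "name"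
  pvA_opre ++ fragment ++ pvA_osuf

-- ===== PORT B =====
def pvB_pre : String := "\n        name\n        fields {\n          name\n          type {\n            name\n            fields {\n              "
def pvB_suf : String := "\n            }\n          }\n        }\n        "
def pvB_opre : String := "\n      __schema {\n        types {\n          "
def pvB_osuf : String := "\n        }\n      }\n    "

-- Python's `s * n` on strings (n ≤ 0 gives "")
def pvStrMul (s : String) (n : Int) : String :=
  String.ofList (List.replicate n.toNat s.toList).flatten

def build_deep_introspection_fragment_alt (depth : Int) : String :=
  pvB_opre ++ pvStrMul pvB_pre depth ++ "name" ++ pvStrMul pvB_suf depth ++ pvB_osuf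

-- ===== PRECONDITION & SPEC =====
def Spec_build_deep_introspection_fragment (depth : Int) (out : String) : Prop := out = build_deep_introspection_fragment_alt depth
instance (depth : Int) (out : String) : Decidable (Spec_build_deep_introspection_fragment depth out) := by unfold Spec_build_deep_introspection_fragment; infer_instance

-- ===== CLAIM (what is proved, stated in full; the proofs are below) =====
def Claim_equal_build_deep_introspection_fragment : Prop := ∀ (depth : Int), Dom_build_deep_introspection_fragment depth → Spec_build_deep_introspection_fragment depth (build_deep_introspection_fragment depth)

-- ===== LEMMAS AND PROOFS =====

lemma pvStrMul_zero (s : String) : pvStrMul s 0 = "" := by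
  apply String.toList_inj.mp
  simp [pvStrMul]

lemma pvStrMul_natCast_succ_left (s : String) (n : Nat) :
    pvStrMul s ((n : Int) + 1) = s ++ pvStrMul s (n : Int) := by
  apply String.toList_inj.mp
  have h : (((n : Int) + 1)).toNat = n + 1 := by omega
  simp [pvStrMul, h, List.replicate_succ]

lemma pvStrMul_natCast_succ_right (s : String) (n : Nat) :
    pvStrMul s ((n : Int) + 1) = pvStrMul s (n : Int) ++ s := by
  apply String.toList_inj.mp
  have h : (((n : Int) + 1)).toNat = n + 1 := by omega
  simp [pvStrMul, h, List.replicate_succ']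

lemma pv_core_eq (n : Nat) :
    (PySem.List.pyRange 0 (n : Int) 1).foldl (fun frag _ => pvA_pre ++ frag ++ pvA_suf) "name"
      = pvStrMul pvA_pre (n : Int) ++ "name" ++ pvStrMul pvA_suf (n : Int) := by
  induction n with
  | zero =>
      rw [PySem.List.pyRange_one_eq_nil (by norm_num)]
      simp [pvStrMul_zero]
  | succ n ih =>
      have hcast : ((n + 1 : Nat) : Int) = (n : Int) + 1 := by push_cast; ring
      rw [hcast, PySem.List.pyRange_one_succ_right (by positivity), List.foldl_append, List.foldl_cons,
        List.foldl_nil, ih, pvStrMul_natCast_succ_left pvA_pre n, pvStrMul_natCast_succ_right pvA_suf n]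
      simp [String.append_assoc]

lemma pvStrMul_nonpos (s : String) (d : Int) (hd : d ≤ 0) : pvStrMul s d = "" := by
  apply String.toList_inj.mp
  have h : d.toNat = 0 := by omega
  simp [pvStrMul, h]

-- ===== VERDICT (by name: the statement is the Claim_ definition above) =====
theorem build_deep_introspection_fragment_spec : Claim_equal_build_deep_introspection_fragment := by
  intro depth _
  show _ = _
  unfold build_deep_introspection_fragment build_deep_introspection_fragment_alt
  have hBA_pre : pvB_pre = pvA_pre := rfl
  have hBA_suf : pvB_suf = pvA_suf := rfl
  have hBA_opre : pvB_opre = pvA_opre := rfl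
  have hBA_osuf : pvB_osuf = pvA_osuf := rfl
  rw [hBA_pre, hBA_suf, hBA_opre, hBA_osuf]
  by_cases hd : depth ≤ 0
  · rw [PySem.List.pyRange_one_eq_nil hd, pvStrMul_nonpos _ _ hd, pvStrMul_nonpos _ _ hd]
    simp
  · obtain ⟨n, hn⟩ : ∃ n : Nat, depth = (n : Int) := ⟨depth.toNat, by omega⟩
    subst hn
    rw [pv_core_eq n]
    simp [String.append_assoc]
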